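-- pv_equiv track=rewrite | github.com/imnuman/crpbot | libs/hydra/no_edge_detector.py | _count_losing_streak
-- ===== SOURCE A (Python) =====
-- from typing import Dict, List, Optional, Any, Tuple
--
-- def _count_losing_streak(trades: List[Dict]) -> int:
--     """Count consecutive losses from most recent trades."""
--     streak = 0
--     for trade in reversed(trades):
--         if trade.get("outcome") == "loss":
--             streak += 1
--         else:
--             break
--     return streak
-- ===== SOURCE B (Python) =====
-- def _count_losing_streak(trades):
--     """Count consecutive losses from most recent trades (single forward pass)."""
--     streak = 0
--     for trade in trades:
--         if trade.get("outcome") == "loss":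
--             streak += 1
--         else:
--             streak = 0
--     return streak
-- ===== Notes on version B (the rewrite author's own statement) =====
-- stated objective: alternative
-- what changed: B replaces A's reverse iteration with early break by a single forward pass maintaining a reset-on-non-loss accumulator; the final accumulator equals the trailing losing streak.
import Mathlib
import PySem

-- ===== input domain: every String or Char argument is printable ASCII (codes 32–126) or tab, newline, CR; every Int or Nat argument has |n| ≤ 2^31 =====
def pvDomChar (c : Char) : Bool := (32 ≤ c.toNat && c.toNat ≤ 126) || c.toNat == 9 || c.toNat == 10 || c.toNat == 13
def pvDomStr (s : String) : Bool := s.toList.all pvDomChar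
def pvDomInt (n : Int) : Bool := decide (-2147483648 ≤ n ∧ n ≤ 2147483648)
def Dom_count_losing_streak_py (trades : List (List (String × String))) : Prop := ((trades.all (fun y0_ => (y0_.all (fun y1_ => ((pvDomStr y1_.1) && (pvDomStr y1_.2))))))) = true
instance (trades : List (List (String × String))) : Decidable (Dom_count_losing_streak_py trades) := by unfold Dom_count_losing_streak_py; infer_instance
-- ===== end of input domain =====

-- B computes the trailing losing-streak by one forward pass with a reset-on-non-loss accumulator instead of A's reverse scan with early break (alternative decomposition).


-- ===== PORT A =====
-- shared predicate: trade.get("outcome") == "loss"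
def pvIsLoss (trade : List (String × String)) : Bool :=
  (PySem.Dict.mk trade).get? "outcome" == some "loss"

-- A: scan reversed(trades), increment while loss, break at the first non-loss
def pvStreakRev : List (List (String × String)) → Int
  | [] => 0
  | t :: rest => if pvIsLoss t then 1 + pvStreakRev rest else 0

def count_losing_streak_py (trades : List (List (String × String))) : Int :=
  pvStreakRev trades.reverse

-- ===== PORT B =====
-- B: forward fold with a reset-on-non-loss accumulator
def count_losing_streak_py_alt (trades : List (List (String × String))) : Int :=
  trades.foldl (fun streak t => if pvIsLoss t then streak + 1 else 0) 0

-- ===== PRECONDITION & SPEC =====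
def Spec_count_losing_streak_py (trades : List (List (String × String))) (out : Int) : Prop := out = count_losing_streak_py_alt trades
instance (trades : List (List (String × String))) (out : Int) : Decidable (Spec_count_losing_streak_py trades out) := by unfold Spec_count_losing_streak_py; infer_instance

-- ===== CLAIM (what is proved, stated in full; the proofs are below) =====
def Claim_equal_count_losing_streak_py : Prop := ∀ (trades : List (List (String × String))), Dom_count_losing_streak_py trades → Spec_count_losing_streak_py trades (count_losing_streak_py trades)

-- ===== LEMMAS AND PROOFS =====

-- ===== VERDICT (by name: the statement is the Claim_ definition above) =====
theorem pvFold_eq_rev (l : List (List (String × String))) :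
    l.foldl (fun streak t => if pvIsLoss t then streak + 1 else 0) 0 = pvStreakRev l.reverse := by
  induction l using List.reverseRecOn with
  | nil => rfl
  | append_singleton l t ih =>
      rw [List.foldl_append, List.reverse_append]
      simp only [List.foldl, List.reverse_singleton, List.singleton_append, pvStreakRev, ih]
      split_ifs <;> omega

theorem count_losing_streak_py_spec : Claim_equal_count_losing_streak_py := by
  intro trades _
  unfold Spec_count_losing_streak_py count_losing_streak_py count_losing_streak_py_alt
  exact (pvFold_eq_rev trades).symm
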